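-- pv_equiv track=rewrite | github.com/eLBati/pos | pos_session_close_by_tax/models/pos_order.py | _check_grouping_applicability
-- ===== SOURCE A (Python) =====
-- def _check_grouping_applicability(lines):
--     date_maturity = False
--     tax_line_id_account_id = False
--     tax_ids_account_id = False
--     for line in lines:
--         if line.get('date_maturity'):
--             if date_maturity and date_maturity != line['date_maturity']:
--                 return False
--             date_maturity = line['date_maturity']
--         if line.get('tax_line_id'):
--             if (
--                 tax_line_id_account_id and
--                 tax_line_id_account_id != line['account_id']
--             ):
--                 return False
--             tax_line_id_account_id = line['account_id']
--         if line.get('tax_ids'):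
--             if (
--                 tax_ids_account_id and
--                 tax_ids_account_id != line['account_id']
--             ):
--                 return False
--             tax_ids_account_id = line['account_id']
--     return True
-- ===== SOURCE B (Python) =====
-- # B: three filtered gathers + cardinality tests instead of one interleaved
-- # sentinel loop with early return.
-- def _check_grouping_applicability(lines):
--     maturities = {l['date_maturity'] for l in lines if l.get('date_maturity')}
--     tax_line_accounts = {l['account_id'] for l in lines if l.get('tax_line_id')}
--     tax_ids_accounts = {l['account_id'] for l in lines if l.get('tax_ids')}
--     return all(len(s) <= 1 for s in (maturities, tax_line_accounts, tax_ids_accounts))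
-- ===== Notes on version B (the rewrite author's own statement) =====
-- stated objective: simpler
-- what changed: Replaces the single interleaved pass with three running sentinels and early returns by three filtered set comprehensions plus a cardinality test (len <= 1) on each.
import Mathlib
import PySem

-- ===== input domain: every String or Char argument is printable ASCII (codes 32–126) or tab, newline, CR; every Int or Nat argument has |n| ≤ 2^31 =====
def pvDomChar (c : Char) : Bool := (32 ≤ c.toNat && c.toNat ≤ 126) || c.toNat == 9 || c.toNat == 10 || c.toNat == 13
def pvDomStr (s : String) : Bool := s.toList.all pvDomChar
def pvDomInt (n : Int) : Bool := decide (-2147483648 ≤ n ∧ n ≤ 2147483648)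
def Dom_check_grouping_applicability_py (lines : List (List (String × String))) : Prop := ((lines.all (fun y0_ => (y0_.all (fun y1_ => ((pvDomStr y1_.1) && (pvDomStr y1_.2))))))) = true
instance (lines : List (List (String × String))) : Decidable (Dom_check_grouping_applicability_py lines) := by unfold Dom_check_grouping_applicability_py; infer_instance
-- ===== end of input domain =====

-- ===== PORT A =====
-- B changes the decomposition: three filtered gathers plus a cardinality test replace
-- A's single interleaved sentinel loop with early returns; same value on all of Pre_.
-- A's loop, line by line; "" plays the role of both the initial False sentinel and a
-- falsy ('' or missing, via getD "") Python value — Python's truth test cannot tell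
-- them apart here. line['account_id'] is read with getD "": exact under Pre_, which
-- guarantees the key is present (and truthy) whenever it is read.
def pvALoop : List (List (String × String)) → String → String → String → Bool
  | [], _, _, _ => true
  | line :: rest, dm, tl, ti =>
    let d := PySem.Dict.mk line
    let dmv := d.getD "date_maturity" ""
    let tlv := d.getD "tax_line_id" ""
    let tiv := d.getD "tax_ids" ""
    let acc := d.getD "account_id" ""
    if dmv ≠ "" ∧ dm ≠ "" ∧ dm ≠ dmv then false
    else
      let dm' := if dmv ≠ "" then dmv else dm
      if tlv ≠ "" ∧ tl ≠ "" ∧ tl ≠ acc then false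
      else
        let tl' := if tlv ≠ "" then acc else tl
        if tiv ≠ "" ∧ ti ≠ "" ∧ ti ≠ acc then false
        else pvALoop rest dm' tl' (if tiv ≠ "" then acc else ti)

def check_grouping_applicability_py (lines : List (List (String × String))) : Bool :=
  pvALoop lines "" "" ""

-- ===== PORT B =====
-- {l[valKey] for l in lines if l.get(condKey)}; l[valKey] read with getD "", exact under Pre_.
def pvBSelect (lines : List (List (String × String))) (condKey valKey : String) : List String :=
  lines.filterMap (fun l =>
    if PySem.Dict.getD (PySem.Dict.mk l) condKey "" ≠ "" then
      some (PySem.Dict.getD (PySem.Dict.mk l) valKey "")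
    else none)

def check_grouping_applicability_py_alt (lines : List (List (String × String))) : Bool :=
  let maturities := PySem.Set.ofList (pvBSelect lines "date_maturity" "date_maturity")
  let tax_line_accounts := PySem.Set.ofList (pvBSelect lines "tax_line_id" "account_id")
  let tax_ids_accounts := PySem.Set.ofList (pvBSelect lines "tax_ids" "account_id")
  [maturities, tax_line_accounts, tax_ids_accounts].all (fun s => s.length ≤ 1)

-- ===== PRECONDITION & SPEC =====
-- Pre_ excludes lines carrying a truthy tax_line_id/tax_ids but no truthy 'account_id':
-- with the key absent A raises KeyError; with account_id == '' (malformed data — account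
-- move lines always carry an account) A's falsy value silently resets its sentinel, a
-- defensible-corner artefact of the sentinel encoding that no one would specify.
def Pre_check_grouping_applicability_py (lines : List (List (String × String))) : Prop :=
  ∀ line ∈ lines,
    (PySem.Dict.getD (PySem.Dict.mk line) "tax_line_id" "" ≠ "" ∨
     PySem.Dict.getD (PySem.Dict.mk line) "tax_ids" "" ≠ "") →
    PySem.Dict.getD (PySem.Dict.mk line) "account_id" "" ≠ ""
instance (lines : List (List (String × String))) : Decidable (Pre_check_grouping_applicability_py lines) := by
  unfold Pre_check_grouping_applicability_py; infer_instance

def pvWitness_check_grouping_applicability_py : (List (List (String × String))) :=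
  [[("date_maturity", "2020-01-01"), ("tax_line_id", "1"), ("account_id", "400")],
   [("date_maturity", "2020-01-01"), ("tax_ids", "7"), ("account_id", "400")]]

def Spec_check_grouping_applicability_py (lines : List (List (String × String))) (out : Bool) : Prop := out = check_grouping_applicability_py_alt lines
instance (lines : List (List (String × String))) (out : Bool) : Decidable (Spec_check_grouping_applicability_py lines out) := by unfold Spec_check_grouping_applicability_py; infer_instance

-- ===== CLAIM (what is proved, stated in full; the proofs are below) =====
def Claim_equal_check_grouping_applicability_py : Prop := ∀ (lines : List (List (String × String))), Dom_check_grouping_applicability_py lines → Pre_check_grouping_applicability_py lines → Spec_check_grouping_applicability_py lines (check_grouping_applicability_py lines)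

-- ===== LEMMAS AND PROOFS =====

-- per-category reading of A's sentinel loop
def pvAllEqFrom : String → List String → Bool
  | _, [] => true
  | st, v :: vs => if st ≠ "" ∧ st ≠ v then false else pvAllEqFrom v vs

theorem pvBSelect_cons (line : List (String × String)) (rest : List (List (String × String)))
    (ck vk : String) :
    pvBSelect (line :: rest) ck vk =
      (if PySem.Dict.getD (PySem.Dict.mk line) ck "" ≠ "" then
        PySem.Dict.getD (PySem.Dict.mk line) vk "" :: pvBSelect rest ck vk
      else pvBSelect rest ck vk) := by
  simp only [pvBSelect, List.filterMap_cons]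
  split_ifs <;> rfl

-- the interleaved loop is the conjunction of three independent per-category loops
theorem pvALoop_eq (lines : List (List (String × String))) :
    ∀ dm tl ti, pvALoop lines dm tl ti =
      (pvAllEqFrom dm (pvBSelect lines "date_maturity" "date_maturity") &&
       pvAllEqFrom tl (pvBSelect lines "tax_line_id" "account_id") &&
       pvAllEqFrom ti (pvBSelect lines "tax_ids" "account_id")) := by
  induction lines with
  | nil => intro dm tl ti; simp [pvALoop, pvBSelect, pvAllEqFrom]
  | cons line rest ih =>
    intro dm tl ti
    simp only [pvALoop, pvBSelect_cons, ih]
    by_cases hdm : dm = "" <;> by_cases htl : tl = "" <;> by_cases hti : ti = "" <;>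
      split_ifs <;> simp_all [pvAllEqFrom]

theorem pvAllEqFrom_all_eq (vs : List String) :
    ∀ v, v ≠ "" → (∀ x ∈ vs, x ≠ "") →
      (pvAllEqFrom v vs = true ↔ ∀ x ∈ vs, x = v) := by
  induction vs with
  | nil => simp [pvAllEqFrom]
  | cons w ws ih =>
    intro v hv hall
    have hws : ∀ x ∈ ws, x ≠ "" := fun x hx => hall x (List.mem_cons_of_mem _ hx)
    by_cases hw : v = w
    · subst hw
      simp only [pvAllEqFrom, ne_eq, not_true_eq_false, and_false, if_false]
      rw [ih v hv hws]
      constructor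
      · intro h x hx; rcases List.mem_cons.mp hx with h' | h'
        · exact h'
        · exact h x h'
      · intro h x hx; exact h x (List.mem_cons_of_mem _ hx)
    · have hfalse : pvAllEqFrom v (w :: ws) = false := by
        simp [pvAllEqFrom, hv, hw]
      rw [hfalse]
      simp only [Bool.false_eq_true, false_iff]
      intro h
      exact hw (Eq.symm (h w (by simp)))

theorem pvSet_card_le_one (vs : List String) (v : String) :
    ((PySem.Set.ofList (v :: vs)).length ≤ 1) ↔ ∀ x ∈ vs, x = v := by
  have hv : v ∈ PySem.Set.ofList (v :: vs) := by simp [PySem.Set.mem_ofList]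
  have hnd := PySem.Set.nodup_ofList (v :: vs)
  constructor
  · intro hle x hx
    have hx' : x ∈ PySem.Set.ofList (v :: vs) := by simp [PySem.Set.mem_ofList, hx]
    rcases hS : PySem.Set.ofList (v :: vs) with _ | ⟨a, _ | ⟨b, t⟩⟩
    · rw [hS] at hv; cases hv
    · rw [hS] at hv hx'; simp at hv hx'; rw [hv, hx']
    · rw [hS] at hle; simp at hle
  · intro hall
    have hmem : ∀ x ∈ PySem.Set.ofList (v :: vs), x = v := by
      intro x hx
      rcases List.mem_cons.mp ((PySem.Set.mem_ofList _ _).mp hx) with h | h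
      · exact h
      · exact hall x h
    rcases hS : PySem.Set.ofList (v :: vs) with _ | ⟨a, _ | ⟨b, t⟩⟩ <;> rw [hS] at hmem hnd
    · simp
    · simp
    · exfalso
      have ha : a = v := hmem a (by simp)
      have hb : b = v := hmem b (by simp)
      simp [ha, hb] at hnd

-- a category's loop run from the False sentinel, against B's cardinality test
theorem pvCat (vs : List String) (h : ∀ x ∈ vs, x ≠ "") :
    pvAllEqFrom "" vs = decide ((PySem.Set.ofList vs).length ≤ 1) := by
  cases vs with
  | nil => simp [pvAllEqFrom, PySem.Set.ofList]
  | cons v ws =>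
    have hv : v ≠ "" := h v (by simp)
    have hws : ∀ x ∈ ws, x ≠ "" := fun x hx => h x (List.mem_cons_of_mem _ hx)
    have h1 : pvAllEqFrom "" (v :: ws) = pvAllEqFrom v ws := by
      simp [pvAllEqFrom]
    rw [h1]
    cases hb : pvAllEqFrom v ws
    · rw [eq_comm, decide_eq_false_iff_not, pvSet_card_le_one]
      intro hc
      have := (pvAllEqFrom_all_eq ws v hv hws).mpr hc
      rw [hb] at this; cases this
    · rw [eq_comm, decide_eq_true_eq, pvSet_card_le_one]
      exact (pvAllEqFrom_all_eq ws v hv hws).mp hb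

theorem pvBSelect_mat_ne (lines : List (List (String × String))) :
    ∀ x ∈ pvBSelect lines "date_maturity" "date_maturity", x ≠ "" := by
  intro x hx
  simp only [pvBSelect, List.mem_filterMap] at hx
  obtain ⟨l, _, hl⟩ := hx
  by_cases hc : PySem.Dict.getD (PySem.Dict.mk l) "date_maturity" "" ≠ ""
  · rw [if_pos hc] at hl; cases hl; exact hc
  · rw [if_neg hc] at hl; cases hl

theorem pvBSelect_acc_ne (lines : List (List (String × String)))
    (hpre : Pre_check_grouping_applicability_py lines) (ck : String)
    (hck : ck = "tax_line_id" ∨ ck = "tax_ids") :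
    ∀ x ∈ pvBSelect lines ck "account_id", x ≠ "" := by
  intro x hx
  simp only [pvBSelect, List.mem_filterMap] at hx
  obtain ⟨l, hl, hsome⟩ := hx
  by_cases hc : PySem.Dict.getD (PySem.Dict.mk l) ck "" ≠ ""
  · rw [if_pos hc] at hsome; cases hsome
    rcases hck with h | h <;> subst h
    · exact hpre l hl (Or.inl hc)
    · exact hpre l hl (Or.inr hc)
  · rw [if_neg hc] at hsome; cases hsome

-- ===== VERDICT (by name: the statement is the Claim_ definition above) =====
theorem check_grouping_applicability_py_spec : Claim_equal_check_grouping_applicability_py := by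
  intro lines _ hpre
  unfold Spec_check_grouping_applicability_py
  unfold check_grouping_applicability_py check_grouping_applicability_py_alt
  rw [pvALoop_eq,
    pvCat _ (pvBSelect_mat_ne lines),
    pvCat _ (pvBSelect_acc_ne lines hpre _ (Or.inl rfl)),
    pvCat _ (pvBSelect_acc_ne lines hpre _ (Or.inr rfl))]
  simp [List.all, Bool.and_assoc]
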